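-- pv_equiv track=rewrite | github.com/jude27mad/tax-prep-app | PyPDF2/__init__.py | _extract_metadata_value
-- ===== SOURCE A (Python) =====
-- from typing import Iterable
--
-- def _extract_metadata_value(pdf_text: str, key: str) -> str | None:
--     marker = f"/{key}"
--     start = pdf_text.find(marker)
--     if start == -1:
--         return None
--     start = pdf_text.find("(", start)
--     if start == -1:
--         return None
--     start += 1
--     result: list[str] = []
--     escaped = False
--     for ch in pdf_text[start:]:
--         if escaped:
--             result.append(ch)
--             escaped = False
--             continue
--         if ch == "\\":
--             escaped = True
--             continue
--         if ch == ")":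
--             break
--         result.append(ch)
--     if not result and not escaped:
--         return ""
--     return _unescape_pdf_string("".join(result))
--
-- def _unescape_pdf_string(value: str) -> str:
--     replacements: Iterable[tuple[str, str]] = (
--         (r"\\(", "("),
--         (r"\\)", ")"),
--         (r"\\\\", "\\"),
--     )
--     for src, dest in replacements:
--         value = value.replace(src, dest)
--     return value
-- ===== SOURCE B (Python) =====
-- from typing import Iterable
--
-- def _extract_metadata_value(pdf_text: str, key: str) -> str | None:
--     marker = f"/{key}"
--     start = pdf_text.find(marker)
--     if start == -1:
--         return None
--     start = pdf_text.find("(", start)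
--     if start == -1:
--         return None
--     rest = pdf_text[start + 1:]
--     # hop from special char to special char with find, collecting whole chunks
--     parts: list[str] = []
--     while True:
--         b = rest.find("\\")
--         p = rest.find(")")
--         if b != -1 and (p == -1 or b < p):
--             parts.append(rest[:b])
--             parts.append(rest[b + 1:b + 2])
--             rest = rest[b + 2:]
--         else:
--             parts.append(rest if p == -1 else rest[:p])
--             break
--     return _unescape_pdf_string("".join(parts))
--
-- def _unescape_pdf_string(value: str) -> str:
--     replacements: Iterable[tuple[str, str]] = (
--         (r"\\(", "("),
--         (r"\\)", ")"),
--         (r"\\\\", "\\"),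
--     )
--     for src, dest in replacements:
--         value = value.replace(src, dest)
--     return value
-- ===== Notes on version B (the rewrite author's own statement) =====
-- stated objective: alternative
-- what changed: replaced the per-character escape-flag state machine with a chunk-hopping loop that uses str.find to jump to the next backslash or closing paren and copies whole slices between them
import Mathlib
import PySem

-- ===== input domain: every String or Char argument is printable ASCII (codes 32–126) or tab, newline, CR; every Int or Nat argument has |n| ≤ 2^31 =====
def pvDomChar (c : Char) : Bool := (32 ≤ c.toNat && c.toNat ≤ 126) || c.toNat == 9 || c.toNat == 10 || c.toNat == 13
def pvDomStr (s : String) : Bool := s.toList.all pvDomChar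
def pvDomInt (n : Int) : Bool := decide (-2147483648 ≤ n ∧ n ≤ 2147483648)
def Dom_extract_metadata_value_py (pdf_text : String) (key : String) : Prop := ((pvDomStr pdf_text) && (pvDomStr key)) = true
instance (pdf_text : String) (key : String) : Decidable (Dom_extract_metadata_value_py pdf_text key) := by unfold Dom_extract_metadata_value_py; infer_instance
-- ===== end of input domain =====

-- B replaces A's per-character escape-flag state machine by a chunk-hopping loop driven by find (alternative structure, same cost).

-- shared helper of both Pythons: _unescape_pdf_string (sequential str.replace passes)
def pvUnescape (value : String) : String :=
  PySem.Str.replace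
    (PySem.Str.replace
      (PySem.Str.replace value "\\\\(" "(")
      "\\\\)" ")")
    "\\\\\\\\" "\\\\"

-- ===== PORT A =====
-- the for-loop over pdf_text[start:] with its escaped flag and running result list
def pvLoopA : List Char → Bool → List Char → (List Char × Bool)
  | [], esc, res => (res, esc)
  | c :: rest, esc, res =>
    if esc then pvLoopA rest false (res ++ [c])
    else if c = '\\' then pvLoopA rest true res
    else if c = ')' then (res, esc)
    else pvLoopA rest esc (res ++ [c])

def extract_metadata_value_py (pdf_text : String) (key : String) : Option String :=
  let marker := "/" ++ key
  let start := PySem.Str.find pdf_text marker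
  if start = -1 then none
  else
    let start2 := PySem.Str.findFrom pdf_text "(" start none
    if start2 = -1 then none
    else
      let tail := PySem.List.slice pdf_text.toList (some (start2 + 1)) none
      let r := pvLoopA tail false []
      if r.1 = [] ∧ r.2 = false then some ""
      else some (pvUnescape (String.ofList r.1))

-- ===== PORT B =====
-- the while-loop: hop to the next '\' or ')' with find, copy whole chunks
def pvChunks (rest : List Char) : List Char :=
  let b := PySem.Chars.find rest ['\\']
  let p := PySem.Chars.find rest [')']
  if h : b ≠ -1 ∧ (p = -1 ∨ b < p) then
    PySem.List.slice rest none (some b)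
      ++ PySem.List.slice rest (some (b + 1)) (some (b + 2))
      ++ pvChunks (PySem.List.slice rest (some (b + 2)) none)
  else if p = -1 then rest
  else PySem.List.slice rest none (some p)
termination_by rest.length
decreasing_by
  have hb1 := PySem.Chars.neg_one_le_find rest ['\\']
  have hinf : ['\\'] <:+: rest := (PySem.Chars.find_ne_neg_one_iff rest ['\\']).1 h.1
  have hlen : 1 ≤ rest.length := by simpa using hinf.length_le
  rw [PySem.List.slice_from rest (by omega)]
  simp only [List.length_drop]
  omega

def extract_metadata_value_py_alt (pdf_text : String) (key : String) : Option String :=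
  let marker := "/" ++ key
  let start := PySem.Str.find pdf_text marker
  if start = -1 then none
  else
    let start2 := PySem.Str.findFrom pdf_text "(" start none
    if start2 = -1 then none
    else
      let rest := PySem.List.slice pdf_text.toList (some (start2 + 1)) none
      some (pvUnescape (String.ofList (pvChunks rest)))

-- ===== PRECONDITION & SPEC =====
def Spec_extract_metadata_value_py (pdf_text : String) (key : String) (out : Option String) : Prop := out = extract_metadata_value_py_alt pdf_text key
instance (pdf_text : String) (key : String) (out : Option String) : Decidable (Spec_extract_metadata_value_py pdf_text key out) := by unfold Spec_extract_metadata_value_py; infer_instance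

-- ===== CLAIM (what is proved, stated in full; the proofs are below) =====
def Claim_equal_extract_metadata_value_py : Prop := ∀ (pdf_text : String) (key : String), Dom_extract_metadata_value_py pdf_text key → Spec_extract_metadata_value_py pdf_text key (extract_metadata_value_py pdf_text key)

-- ===== LEMMAS AND PROOFS =====

lemma pv_find_eq_of_spec (s sub : List Char) (k : Nat)
    (h1 : sub <+: s.drop k) (h2 : ∀ i < k, ¬ sub <+: s.drop i) :
    PySem.Chars.find s sub = (k : Int) := by
  have hinf : sub <:+: s := h1.isInfix.trans (List.drop_suffix k s).isInfix
  have hnn : 0 ≤ PySem.Chars.find s sub := (PySem.Chars.find_nonneg_iff s sub).2 hinf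
  obtain ⟨hpre, hmin⟩ := PySem.Chars.find_spec hnn
  rcases lt_trichotomy (PySem.Chars.find s sub).toNat k with h | h | h
  · exact absurd hpre (h2 _ h)
  · omega
  · exact absurd h1 (hmin _ h)

lemma pv_findc_nil (c : Char) : PySem.Chars.find [] [c] = -1 := by
  apply (PySem.Chars.find_eq_neg_one_iff _ _).2
  simp

lemma pv_findc_cons (a c : Char) (s : List Char) :
    PySem.Chars.find (a :: s) [c] =
      if a = c then 0
      else if PySem.Chars.find s [c] = -1 then -1 else PySem.Chars.find s [c] + 1 := by
  by_cases hac : a = c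
  · subst hac
    rw [if_pos rfl]
    exact pv_find_eq_of_spec (a :: s) [a] 0 (by simp) (by omega)
  · rw [if_neg hac]
    by_cases hf : PySem.Chars.find s [c] = -1
    · rw [if_pos hf]
      apply (PySem.Chars.find_eq_neg_one_iff _ _).2
      intro hinf
      have hmem : c ∈ a :: s := hinf.subset (by simp)
      rcases List.mem_cons.1 hmem with h | h
      · exact hac h.symm
      · obtain ⟨l1, l2, hl⟩ := List.append_of_mem h
        have : [c] <:+: s := ⟨l1, l2, by simp [hl]⟩
        exact (PySem.Chars.find_eq_neg_one_iff s [c]).1 hf this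
    · rw [if_neg hf]
      have h0 : 0 ≤ PySem.Chars.find s [c] := by
        have := PySem.Chars.neg_one_le_find s [c]; omega
      obtain ⟨hpre, hmin⟩ := PySem.Chars.find_spec h0
      have heq : PySem.Chars.find (a :: s) [c] = (((PySem.Chars.find s [c]).toNat + 1 : Nat) : Int) := by
        apply pv_find_eq_of_spec
        · simpa using hpre
        · intro i hi
          cases i with
          | zero =>
            intro hp
            exact hac (List.cons_prefix_cons.1 hp).1.symm
          | succ j =>
            intro hp
            exact hmin j (by omega) (by simpa using hp)
      rw [heq]; push_cast; omega

lemma pvChunks_nil : pvChunks [] = [] := by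
  rw [pvChunks]
  simp [pv_findc_nil]

lemma pvChunks_rparen (s : List Char) : pvChunks (')' :: s) = [] := by
  rw [pvChunks]
  have hp : PySem.Chars.find (')' :: s) [')'] = 0 := by rw [pv_findc_cons]; simp
  have hb := PySem.Chars.neg_one_le_find (')' :: s) ['\\']
  rw [dif_neg (by rw [hp]; omega)]
  rw [hp, if_neg (by omega), PySem.List.slice_to _ (by omega)]
  simp

lemma pvChunks_backslash (s : List Char) :
    pvChunks ('\\' :: s) = s.take 1 ++ pvChunks (s.drop 1) := by
  rw [pvChunks]
  have hb : PySem.Chars.find ('\\' :: s) ['\\'] = 0 := by rw [pv_findc_cons]; simp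
  have hg := PySem.Chars.neg_one_le_find s [')']
  have hp : PySem.Chars.find ('\\' :: s) [')'] =
      if PySem.Chars.find s [')'] = -1 then -1 else PySem.Chars.find s [')'] + 1 := by
    rw [pv_findc_cons]; simp
  rw [dif_pos (by
    constructor
    · rw [hb]; omega
    · rw [hb, hp]
      split_ifs with h
      · left; rfl
      · right; omega)]
  rw [hb]
  norm_num
  rw [PySem.List.slice_to _ (by omega), PySem.List.slice_toNat _ (by omega) (by omega),
      PySem.List.slice_from _ (by omega)]
  simp

lemma pvChunks_cons (a : Char) (s : List Char) (h1 : a ≠ '\\') (h2 : a ≠ ')') :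
    pvChunks (a :: s) = a :: pvChunks s := by
  have hbf : PySem.Chars.find (a :: s) ['\\'] =
      if PySem.Chars.find s ['\\'] = -1 then -1 else PySem.Chars.find s ['\\'] + 1 := by
    rw [pv_findc_cons]; simp [h1]
  have hpf : PySem.Chars.find (a :: s) [')'] =
      if PySem.Chars.find s [')'] = -1 then -1 else PySem.Chars.find s [')'] + 1 := by
    rw [pv_findc_cons]; simp [h2]
  have hfge := PySem.Chars.neg_one_le_find s ['\\']
  have hgge := PySem.Chars.neg_one_le_find s [')']
  conv_lhs => rw [pvChunks]
  conv_rhs => rw [pvChunks]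
  by_cases hfneg : PySem.Chars.find s ['\\'] = -1
  · have hb' : PySem.Chars.find (a :: s) ['\\'] = -1 := by rw [hbf, if_pos hfneg]
    rw [dif_neg (by simp [hb']), dif_neg (by simp [hfneg])]
    by_cases hgneg : PySem.Chars.find s [')'] = -1
    · have hp' : PySem.Chars.find (a :: s) [')'] = -1 := by rw [hpf, if_pos hgneg]
      rw [if_pos hp', if_pos hgneg]
    · have hp' : PySem.Chars.find (a :: s) [')'] = PySem.Chars.find s [')'] + 1 := by
        rw [hpf, if_neg hgneg]
      obtain ⟨gk, hgk⟩ : ∃ k : Nat, PySem.Chars.find s [')'] = (k : Int) := ⟨(PySem.Chars.find s [')']).toNat, by omega⟩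
      rw [if_neg (by rw [hp']; omega), if_neg hgneg, hp', hgk,
          show (gk : Int) + 1 = ((gk + 1 : Nat) : Int) by push_cast; ring,
          PySem.List.slice_to_natCast, PySem.List.slice_to_natCast, List.take_succ_cons]
  · have hb' : PySem.Chars.find (a :: s) ['\\'] = PySem.Chars.find s ['\\'] + 1 := by
      rw [hbf, if_neg hfneg]
    by_cases hC : PySem.Chars.find s [')'] = -1 ∨ PySem.Chars.find s ['\\'] < PySem.Chars.find s [')']
    · have hC' : PySem.Chars.find (a :: s) [')'] = -1 ∨
          PySem.Chars.find (a :: s) ['\\'] < PySem.Chars.find (a :: s) [')'] := by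
        rw [hpf, hb']
        rcases hC with h | h
        · left; rw [if_pos h]
        · right; rw [if_neg (by omega)]; omega
      rw [dif_pos ⟨by rw [hb']; omega, hC'⟩, dif_pos ⟨hfneg, hC⟩, hb']
      obtain ⟨fk, hfk⟩ : ∃ k : Nat, PySem.Chars.find s ['\\'] = (k : Int) := ⟨(PySem.Chars.find s ['\\']).toNat, by omega⟩
      rw [hfk,
          show (fk : Int) + 1 + 2 = ((((fk + 1) + 1) + 1 : Nat) : Int) by push_cast; ring,
          show (fk : Int) + 1 + 1 = (((fk + 1) + 1 : Nat) : Int) by push_cast; ring,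
          show (fk : Int) + 2 = (((fk + 1) + 1 : Nat) : Int) by push_cast; ring,
          show (fk : Int) + 1 = ((fk + 1 : Nat) : Int) by push_cast; ring]
      rw [PySem.List.slice_to_natCast, PySem.List.slice_to_natCast,
          PySem.List.slice_natCast, PySem.List.slice_natCast,
          PySem.List.slice_from_natCast, PySem.List.slice_from_natCast,
          List.take_succ_cons, List.drop_succ_cons, List.drop_succ_cons]
      simp
    · push Not at hC
      have hgneg : ¬ PySem.Chars.find s [')'] = -1 := hC.1
      have hp' : PySem.Chars.find (a :: s) [')'] = PySem.Chars.find s [')'] + 1 := by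
        rw [hpf, if_neg hgneg]
      rw [dif_neg (by push Not; intro _; rw [hp', hb']; omega),
          dif_neg (by push Not; intro _; constructor <;> omega)]
      rw [if_neg (by rw [hp']; omega), if_neg hgneg, hp']
      obtain ⟨gk, hgk⟩ : ∃ k : Nat, PySem.Chars.find s [')'] = (k : Int) := ⟨(PySem.Chars.find s [')']).toNat, by omega⟩
      rw [hgk, show (gk : Int) + 1 = ((gk + 1 : Nat) : Int) by push_cast; ring,
          PySem.List.slice_to_natCast, PySem.List.slice_to_natCast, List.take_succ_cons]

lemma pv_loopA_chunks (n : Nat) : ∀ s : List Char, s.length ≤ n → ∀ res : List Char,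
    (pvLoopA s false res).1 = res ++ pvChunks s := by
  induction n with
  | zero =>
    intro s hs res
    have : s = [] := by
      cases s with
      | nil => rfl
      | cons c t => simp at hs
    subst this
    simp [pvLoopA, pvChunks_nil]
  | succ n ih =>
    intro s hs res
    cases s with
    | nil => simp [pvLoopA, pvChunks_nil]
    | cons c t =>
      by_cases hc : c = '\\'
      · subst hc
        rw [pvChunks_backslash]
        cases t with
        | nil => simp [pvLoopA, pvChunks_nil]
        | cons d t' =>
          have : pvLoopA ('\\' :: d :: t') false res = pvLoopA t' false (res ++ [d]) := by
            simp [pvLoopA]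
          rw [this, ih t' (by simp at hs ⊢; omega) (res ++ [d])]
          simp
      · by_cases hp : c = ')'
        · subst hp
          have : pvLoopA (')' :: t) false res = (res, false) := by simp [pvLoopA]
          rw [this, pvChunks_rparen]
          simp
        · have : pvLoopA (c :: t) false res = pvLoopA t false (res ++ [c]) := by
            simp [pvLoopA, hc, hp]
          rw [this, ih t (by simp at hs; omega) (res ++ [c]), pvChunks_cons c t hc hp]
          simp

-- ===== VERDICT (by name: the statement is the Claim_ definition above) =====
theorem extract_metadata_value_py_spec : Claim_equal_extract_metadata_value_py := by
  intro pdf_text key _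
  unfold Spec_extract_metadata_value_py
  unfold extract_metadata_value_py extract_metadata_value_py_alt
  by_cases hm : PySem.Chars.find pdf_text.toList ('/' :: key.toList) = -1
  · simp [hm]
  · by_cases h2 : PySem.Chars.findFrom pdf_text.toList ['('] (PySem.Chars.find pdf_text.toList ('/' :: key.toList)) = -1
    · simp [hm, h2]
    · have hres : ∀ tl : List Char, (pvLoopA tl false []).1 = pvChunks tl := fun tl => by
        simpa using pv_loopA_chunks tl.length tl le_rfl []
      simp only [PySem.Str.find_eq, PySem.Str.findFrom_eq, String.toList_append]
      simp only [show ("/" : String).toList ++ key.toList = '/' :: key.toList from rfl,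
                 show ("(" : String).toList = ['('] from rfl]
      rw [if_neg hm, if_neg hm, if_neg h2, if_neg h2]
      simp only [hres]
      split_ifs with h
      · rw [h.1]
        decide
      · rfl
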